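-- pv_equiv track=rewrite | github.com/pypi-data/pypi-mirror-392 | packages/specql-generator/specql_generator-0.5.0b0.tar.gz/specql_generator-0.5.0b0/src/patterns/hierarchical/utils.py | detect_hierarchical_fields
-- ===== SOURCE A (Python) =====
-- from typing import Any
--
-- def detect_hierarchical_fields(entity_config: dict[str, Any]) -> dict[str, str]:
--     """
--     Auto-detect hierarchical fields from entity definition.
--
--     Returns dict mapping field types to field names.
--     """
--     fields = {}
--
--     if "fields" in entity_config:
--         for field_name, field_config in entity_config["fields"].items():
--             field_type = field_config.get("type", "").lower()
--
--             # Check for ltree path fields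
--             if field_type == "ltree" or "path" in field_name.lower():
--                 fields["path"] = field_name
--
--             # Check for parent references
--             if "parent" in field_name.lower() or field_type.endswith("_id"):
--                 fields["parent_id"] = field_name
--
--             # Check for name/label fields
--             if field_type in ["text", "varchar"] and any(
--                 name in field_name.lower() for name in ["name", "title", "label"]
--             ):
--                 fields["name"] = field_name
--
--     return fields
-- ===== SOURCE B (Python) =====
-- def detect_hierarchical_fields(entity_config):
--     """Auto-detect hierarchical fields: one independent last-match scan per category."""
--     field_items = list(entity_config.get("fields", {}).items())
--
--     def last_match(pred):
--         found = None
--         for name, cfg in field_items: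
--             if pred(name.lower(), cfg.get("type", "").lower()):
--                 found = name
--         return found
--
--     categories = [
--         ("path", lambda n, t: t == "ltree" or "path" in n),
--         ("parent_id", lambda n, t: "parent" in n or t.endswith("_id")),
--         ("name", lambda n, t: t in ("text", "varchar")
--          and any(k in n for k in ("name", "title", "label"))),
--     ]
--     return {key: name for key, pred in categories
--             if (name := last_match(pred)) is not None}
-- ===== Notes on version B (the rewrite author's own statement) =====
-- stated objective: alternative
-- what changed: A fills one mutable dict inside a single loop with three conditional writes per field; B runs one independent last-match scan per category and assembles the result dict in fixed category order (path, parent_id, name). Pre_ excludes configs where the categories first trigger out of that canonical order: there A and B return equal dicts whose accidental key insertion order differs.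
import Mathlib
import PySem

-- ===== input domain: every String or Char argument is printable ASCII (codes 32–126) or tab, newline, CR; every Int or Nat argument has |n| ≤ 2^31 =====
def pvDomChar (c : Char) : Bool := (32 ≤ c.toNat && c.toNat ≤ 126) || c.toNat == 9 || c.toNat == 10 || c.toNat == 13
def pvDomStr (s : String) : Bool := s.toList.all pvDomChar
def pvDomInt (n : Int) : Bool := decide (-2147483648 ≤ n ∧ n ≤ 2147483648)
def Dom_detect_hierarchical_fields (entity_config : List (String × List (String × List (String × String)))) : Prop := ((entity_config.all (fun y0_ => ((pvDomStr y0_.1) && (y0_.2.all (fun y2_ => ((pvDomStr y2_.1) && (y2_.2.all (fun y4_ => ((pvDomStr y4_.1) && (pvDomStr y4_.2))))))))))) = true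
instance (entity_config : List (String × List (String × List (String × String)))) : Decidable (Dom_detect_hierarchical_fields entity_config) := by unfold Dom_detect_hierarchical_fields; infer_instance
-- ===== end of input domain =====

-- B replaces A's single mutable-dict loop by one independent last-match scan per category,
-- assembled in fixed category order; objective: alternative decomposition, same cost.
-- Equality of the returned association lists is claimed on Pre_ (canonical first-trigger order);
-- outside Pre_ the two dicts are equal as mappings but their key insertion order differs.

-- ===== PORT A =====
-- one iteration of A's for-loop: three conditional dict writes
def aStep (d : PySem.Dict String String) (x : String × List (String × String)) : PySem.Dict String String :=
  let field_type := PySem.Str.lower (PySem.Dict.getD (PySem.Dict.mk x.2) "type" "")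
  let d := if field_type == "ltree" || PySem.Str.isIn "path" (PySem.Str.lower x.1) then d.insert "path" x.1 else d
  let d := if PySem.Str.isIn "parent" (PySem.Str.lower x.1) || PySem.Str.endswith field_type "_id" then d.insert "parent_id" x.1 else d
  if (["text", "varchar"].contains field_type) && (["name", "title", "label"].any fun nm => PySem.Str.isIn nm (PySem.Str.lower x.1)) then d.insert "name" x.1 else d

def detect_hierarchical_fields (entity_config : List (String × List (String × List (String × String)))) : List (String × String) :=
  match (PySem.Dict.mk entity_config).get? "fields" with
  | some flds => (flds.foldl aStep PySem.Dict.empty).items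
  | none => []

-- ===== PORT B =====
def bType (cfg : List (String × String)) : String :=
  PySem.Str.lower (PySem.Dict.getD (PySem.Dict.mk cfg) "type" "")

-- the three category predicates (Source B's lambdas; each lowers the field name itself)
def pPath (n t : String) : Bool := t == "ltree" || PySem.Str.isIn "path" (PySem.Str.lower n)
def pParent (n t : String) : Bool := PySem.Str.isIn "parent" (PySem.Str.lower n) || PySem.Str.endswith t "_id"
def pName (n t : String) : Bool :=
  (["text", "varchar"].contains t) && (["name", "title", "label"].any fun k => PySem.Str.isIn k (PySem.Str.lower n))

-- Source B's last_match: name of the last field satisfying the predicate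
def lastMatch (p : String → String → Bool) : List (String × List (String × String)) → Option String → Option String
  | [], acc => acc
  | x :: t, acc => lastMatch p t (if p x.1 (bType x.2) then some x.1 else acc)

-- one optional entry of the result (the comprehension keeps a key only when found)
def optKV (k : String) : Option String → List (String × String)
  | some v => [(k, v)]
  | none => []

def detect_hierarchical_fields_alt (entity_config : List (String × List (String × List (String × String)))) : List (String × String) :=
  let items := PySem.Dict.getD (PySem.Dict.mk entity_config) "fields" []
  optKV "path" (lastMatch pPath items none)
    ++ optKV "parent_id" (lastMatch pParent items none)
    ++ optKV "name" (lastMatch pName items none)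

-- ===== PRECONDITION & SPEC =====
-- index of the first field of a category (a condition on the input's shape, not a run of either program)
def fidx (p : String → String → Bool) (items : List (String × List (String × String))) : Option Nat :=
  items.findIdx? (fun x => p x.1 (bType x.2))

def ordOpt : Option Nat → Option Nat → Bool
  | some i, some j => i ≤ j
  | _, _ => true

-- Pre_ excludes configs where the three categories first trigger out of the canonical order
-- path ≤ parent_id ≤ name: there A's dict key insertion order is accidental (A and B return
-- equal dicts as mappings, but as ordered association lists they differ).
def Pre_detect_hierarchical_fields (entity_config : List (String × List (String × List (String × String)))) : Prop :=
  let items := PySem.Dict.getD (PySem.Dict.mk entity_config) "fields" []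
  (ordOpt (fidx pPath items) (fidx pParent items)
    && ordOpt (fidx pParent items) (fidx pName items)
    && ordOpt (fidx pPath items) (fidx pName items)) = true
instance (entity_config : List (String × List (String × List (String × String)))) : Decidable (Pre_detect_hierarchical_fields entity_config) := by unfold Pre_detect_hierarchical_fields; infer_instance

def pvWitness_detect_hierarchical_fields : (List (String × List (String × List (String × String)))) :=
  [("fields", [("path", [("type", "ltree")]), ("parent_id", [("type", "integer")]), ("title", [("type", "text")])])]

def Spec_detect_hierarchical_fields (entity_config : List (String × List (String × List (String × String)))) (out : List (String × String)) : Prop := out = detect_hierarchical_fields_alt entity_config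
instance (entity_config : List (String × List (String × List (String × String)))) (out : List (String × String)) : Decidable (Spec_detect_hierarchical_fields entity_config out) := by unfold Spec_detect_hierarchical_fields; infer_instance

-- ===== CLAIM (what is proved, stated in full; the proofs are below) =====
def Claim_equal_detect_hierarchical_fields : Prop := ∀ (entity_config : List (String × List (String × List (String × String)))), Dom_detect_hierarchical_fields entity_config → Pre_detect_hierarchical_fields entity_config → Spec_detect_hierarchical_fields entity_config (detect_hierarchical_fields entity_config)

-- ===== LEMMAS AND PROOFS =====

-- A's loop state, characterised: per category the first-trigger index and last matching name
def bScan (p : String → String → Bool) : List (String × List (String × String)) → Nat → Option (Nat × String) → Option (Nat × String)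
  | [], _, acc => acc
  | x :: t, i, acc =>
      bScan p t (i + 1) (if p x.1 (bType x.2) then some (((acc.map Prod.fst).getD i), x.1) else acc)

-- one optional entry of a piece
def op (k : String) (s : Option (Nat × String)) (i : Nat) : List (String × String) :=
  match s with
  | some a => if a.1 = i then [(k, a.2)] else []
  | none => []

-- the entries A's dict holds at position i
def piece (s1 s2 s3 : Option (Nat × String)) (i : Nat) : List (String × String) :=
  op "path" s1 i ++ op "parent_id" s2 i ++ op "name" s3 i

def canon (s1 s2 s3 : Option (Nat × String)) (n : Nat) : List (String × String) :=
  (List.range n).flatMap (piece s1 s2 s3)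

lemma canon_succ (s1 s2 s3 : Option (Nat × String)) (n : Nat) :
    canon s1 s2 s3 (n + 1) = canon s1 s2 s3 n ++ piece s1 s2 s3 n := by
  simp [canon, List.range_succ]

lemma op_of_ge {s : Option (Nat × String)} {n : Nat} (h : ∀ a ∈ s, n ≤ a.1) {i : Nat} (hi : i < n) (k : String) :
    op k s i = [] := by
  cases s with
  | none => rfl
  | some a => have := h a rfl; simp only [op]; rw [if_neg (by omega)]

lemma op_of_lt {s : Option (Nat × String)} {n : Nat} (h : ∀ a ∈ s, a.1 < n) (k : String) :
    op k s n = [] := by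
  cases s with
  | none => rfl
  | some a => have := h a rfl; simp only [op]; rw [if_neg (by omega)]

lemma canon_stable {s1 s2 s3 : Option (Nat × String)} {n : Nat}
    (h1 : ∀ a ∈ s1, a.1 < n) (h2 : ∀ a ∈ s2, a.1 < n) (h3 : ∀ a ∈ s3, a.1 < n) :
    canon s1 s2 s3 (n + 1) = canon s1 s2 s3 n := by
  rw [canon_succ]; unfold piece
  rw [op_of_lt h1, op_of_lt h2, op_of_lt h3]
  simp

lemma canon_of_le {s1 s2 s3 : Option (Nat × String)} {m : Nat}
    (h1 : ∀ a ∈ s1, a.1 < m) (h2 : ∀ a ∈ s2, a.1 < m) (h3 : ∀ a ∈ s3, a.1 < m) :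
    ∀ {n : Nat}, m ≤ n → canon s1 s2 s3 n = canon s1 s2 s3 m := by
  intro n
  induction n with
  | zero => intro h; rw [show m = 0 from by omega]
  | succ k ih =>
      intro h
      rcases Nat.lt_or_ge m (k + 1) with hlt | hge
      · have hk : m ≤ k := by omega
        rw [canon_stable (fun a ha => lt_of_lt_of_le (h1 a ha) hk)
              (fun a ha => lt_of_lt_of_le (h2 a ha) hk)
              (fun a ha => lt_of_lt_of_le (h3 a ha) hk)]
        exact ih hk
      · have : m = k + 1 := by omega
        subst this; rfl

lemma canon_ge1 {s1 : Option (Nat × String)} {n : Nat} (h : ∀ a ∈ s1, n ≤ a.1) (s2 s3 : Option (Nat × String)) :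
    canon s1 s2 s3 n = canon none s2 s3 n := by
  simp only [canon]
  refine List.flatMap_congr fun i hi => ?_
  unfold piece
  rw [op_of_ge h (List.mem_range.mp hi)]
  rfl

lemma canon_ge2 {s2 : Option (Nat × String)} {n : Nat} (h : ∀ a ∈ s2, n ≤ a.1) (s1 s3 : Option (Nat × String)) :
    canon s1 s2 s3 n = canon s1 none s3 n := by
  simp only [canon]
  refine List.flatMap_congr fun i hi => ?_
  unfold piece
  rw [op_of_ge h (List.mem_range.mp hi)]
  rfl

lemma canon_ge3 {s3 : Option (Nat × String)} {n : Nat} (h : ∀ a ∈ s3, n ≤ a.1) (s1 s2 : Option (Nat × String)) :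
    canon s1 s2 s3 n = canon s1 s2 none n := by
  simp only [canon]
  refine List.flatMap_congr fun i hi => ?_
  unfold piece
  rw [op_of_ge h (List.mem_range.mp hi)]
  rfl

-- the key of slot j occurs in canon iff slot j holds an index < n
lemma any_canon1 (s1 s2 s3 : Option (Nat × String)) (n : Nat) :
    ((canon s1 s2 s3 n).any fun p => p.1 == "path")
      = (match s1 with | some a => decide (a.1 < n) | none => false) := by
  induction n with
  | zero => cases s1 <;> simp [canon]
  | succ n ih =>
      rw [canon_succ, List.any_append, ih]
      unfold piece
      cases s1 <;> cases s2 <;> cases s3 <;> simp [op] <;> split_ifs <;>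
        simp_all <;> omega

lemma any_canon2 (s1 s2 s3 : Option (Nat × String)) (n : Nat) :
    ((canon s1 s2 s3 n).any fun p => p.1 == "parent_id")
      = (match s2 with | some a => decide (a.1 < n) | none => false) := by
  induction n with
  | zero => cases s2 <;> simp [canon]
  | succ n ih =>
      rw [canon_succ, List.any_append, ih]
      unfold piece
      cases s1 <;> cases s2 <;> cases s3 <;> simp [op] <;> split_ifs <;>
        simp_all <;> omega

lemma any_canon3 (s1 s2 s3 : Option (Nat × String)) (n : Nat) :
    ((canon s1 s2 s3 n).any fun p => p.1 == "name")
      = (match s3 with | some a => decide (a.1 < n) | none => false) := by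
  induction n with
  | zero => cases s3 <;> simp [canon]
  | succ n ih =>
      rw [canon_succ, List.any_append, ih]
      unfold piece
      cases s1 <;> cases s2 <;> cases s3 <;> simp [op] <;> split_ifs <;>
        simp_all <;> omega

-- value replacement at a key commutes with canon (slot 1,2,3 versions)
lemma map_canon1 (f : Nat) (w v : String) (s2 s3 : Option (Nat × String)) (n : Nat) :
    List.map (fun p => if p.1 == "path" then ("path", v) else p) (canon (some (f, w)) s2 s3 n)
      = canon (some (f, v)) s2 s3 n := by
  simp only [canon, List.map_flatMap]
  refine List.flatMap_congr fun i hi => ?_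
  unfold piece
  cases s2 <;> cases s3 <;> simp [op] <;> split_ifs <;> simp

lemma map_canon2 (f : Nat) (w v : String) (s1 s3 : Option (Nat × String)) (n : Nat) :
    List.map (fun p => if p.1 == "parent_id" then ("parent_id", v) else p) (canon s1 (some (f, w)) s3 n)
      = canon s1 (some (f, v)) s3 n := by
  simp only [canon, List.map_flatMap]
  refine List.flatMap_congr fun i hi => ?_
  unfold piece
  cases s1 <;> cases s3 <;> simp [op] <;> split_ifs <;> simp

lemma map_canon3 (f : Nat) (w v : String) (s1 s2 : Option (Nat × String)) (n : Nat) :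
    List.map (fun p => if p.1 == "name" then ("name", v) else p) (canon s1 s2 (some (f, w)) n)
      = canon s1 s2 (some (f, v)) n := by
  simp only [canon, List.map_flatMap]
  refine List.flatMap_congr fun i hi => ?_
  unfold piece
  cases s1 <;> cases s2 <;> simp [op] <;> split_ifs <;> simp

lemma ins1 {s1 s2 s3 : Option (Nat × String)} {n : Nat} (v : String)
    (h1 : ∀ a ∈ s1, a.1 < n) (h2 : ∀ a ∈ s2, a.1 < n) (h3 : ∀ a ∈ s3, a.1 < n) :
    (PySem.Dict.mk (canon s1 s2 s3 n)).insert "path" v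
      = PySem.Dict.mk (canon (some ((s1.map Prod.fst).getD n, v)) s2 s3 (n + 1)) := by
  cases s1 with
  | none =>
      have hc : (PySem.Dict.mk (canon none s2 s3 n)).contains "path" = false := by
        rw [PySem.Dict.contains_mk, any_canon1]
      simp only [PySem.Dict.insert, hc, Bool.false_eq_true, if_false,
        Option.map_none, Option.getD_none]
      rw [canon_succ, canon_ge1 (s1 := some (n, v)) (by simp)]
      unfold piece
      rw [op_of_lt h2, op_of_lt h3]
      simp [op]
  | some a =>
      obtain ⟨f, w⟩ := a
      have hf : f < n := h1 (f, w) rfl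
      have hc : (PySem.Dict.mk (canon (some (f, w)) s2 s3 n)).contains "path" = true := by
        rw [PySem.Dict.contains_mk, any_canon1]; simpa using hf
      simp only [PySem.Dict.insert, hc, if_true, Option.map_some, Option.getD_some]
      rw [canon_stable (s1 := some (f, v))
        (by intro a ha; simp only [Option.mem_def, Option.some.injEq] at ha; subst ha; exact hf)
        h2 h3, map_canon1]

lemma ins2 {s1 s2 s3 : Option (Nat × String)} {n : Nat} (v : String)
    (h2 : ∀ a ∈ s2, a.1 < n) (h3 : ∀ a ∈ s3, a.1 < n) :
    (PySem.Dict.mk (canon s1 s2 s3 (n + 1))).insert "parent_id" v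
      = PySem.Dict.mk (canon s1 (some ((s2.map Prod.fst).getD n, v)) s3 (n + 1)) := by
  cases s2 with
  | none =>
      have hc : (PySem.Dict.mk (canon s1 none s3 (n + 1))).contains "parent_id" = false := by
        rw [PySem.Dict.contains_mk, any_canon2]
      simp only [PySem.Dict.insert, hc, Bool.false_eq_true, if_false,
        Option.map_none, Option.getD_none]
      rw [canon_succ s1 (some (n, v)), canon_ge2 (s2 := some (n, v)) (by simp),
        canon_succ s1 none]
      unfold piece
      rw [op_of_lt h3]
      simp [op]
  | some a =>
      obtain ⟨f, w⟩ := a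
      have hf : f < n := h2 (f, w) rfl
      have hc : (PySem.Dict.mk (canon s1 (some (f, w)) s3 (n + 1))).contains "parent_id" = true := by
        rw [PySem.Dict.contains_mk, any_canon2]; simp; omega
      simp only [PySem.Dict.insert, hc, if_true, Option.map_some, Option.getD_some]
      rw [map_canon2]

lemma ins3 {s1 s2 s3 : Option (Nat × String)} {n : Nat} (v : String)
    (h3 : ∀ a ∈ s3, a.1 < n) :
    (PySem.Dict.mk (canon s1 s2 s3 (n + 1))).insert "name" v
      = PySem.Dict.mk (canon s1 s2 (some ((s3.map Prod.fst).getD n, v)) (n + 1)) := by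
  cases s3 with
  | none =>
      have hc : (PySem.Dict.mk (canon s1 s2 none (n + 1))).contains "name" = false := by
        rw [PySem.Dict.contains_mk, any_canon3]
      simp only [PySem.Dict.insert, hc, Bool.false_eq_true, if_false,
        Option.map_none, Option.getD_none]
      rw [canon_succ s1 s2 (some (n, v)), canon_ge3 (s3 := some (n, v)) (by simp),
        canon_succ s1 s2 none]
      unfold piece
      simp [op]
  | some a =>
      obtain ⟨f, w⟩ := a
      have hf : f < n := h3 (f, w) rfl
      have hc : (PySem.Dict.mk (canon s1 s2 (some (f, w)) (n + 1))).contains "name" = true := by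
        rw [PySem.Dict.contains_mk, any_canon3]; simp; omega
      simp only [PySem.Dict.insert, hc, if_true, Option.map_some, Option.getD_some]
      rw [map_canon3]

-- the slot update performed by one loop iteration
def upd (p : String → String → Bool) (s : Option (Nat × String)) (n : Nat) (x : String × List (String × String)) : Option (Nat × String) :=
  if p x.1 (bType x.2) then some ((s.map Prod.fst).getD n, x.1) else s

lemma step_canon {s1 s2 s3 : Option (Nat × String)} {n : Nat} (x : String × List (String × String))
    (h1 : ∀ a ∈ s1, a.1 < n) (h2 : ∀ a ∈ s2, a.1 < n) (h3 : ∀ a ∈ s3, a.1 < n) :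
    aStep (PySem.Dict.mk (canon s1 s2 s3 n)) x
      = PySem.Dict.mk (canon (upd pPath s1 n x) (upd pParent s2 n x) (upd pName s3 n x) (n + 1)) := by
  have e1 : ∀ d : PySem.Dict String String, aStep d x
      = (let d := if pPath x.1 (bType x.2) then d.insert "path" x.1 else d
         let d := if pParent x.1 (bType x.2) then d.insert "parent_id" x.1 else d
         if pName x.1 (bType x.2) then d.insert "name" x.1 else d) := fun d => rfl
  have hstab : PySem.Dict.mk (canon s1 s2 s3 n) = PySem.Dict.mk (canon s1 s2 s3 (n + 1)) := by
    rw [canon_stable h1 h2 h3]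
  rw [e1]
  simp only [upd]
  by_cases c1 : pPath x.1 (bType x.2) <;> by_cases c2 : pParent x.1 (bType x.2) <;>
    by_cases c3 : pName x.1 (bType x.2) <;>
    simp only [c1, c2, c3, if_true, if_false, Bool.false_eq_true]
  · rw [ins1 x.1 h1 h2 h3, ins2 x.1 h2 h3, ins3 x.1 h3]
  · rw [ins1 x.1 h1 h2 h3, ins2 x.1 h2 h3]
  · rw [ins1 x.1 h1 h2 h3, ins3 x.1 h3]
  · rw [ins1 x.1 h1 h2 h3]
  · rw [hstab, ins2 x.1 h2 h3, ins3 x.1 h3]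
  · rw [hstab, ins2 x.1 h2 h3]
  · rw [hstab, ins3 x.1 h3]
  · rw [hstab]

lemma bScan_append (p : String → String → Bool) (l : List (String × List (String × String)))
    (x : String × List (String × String)) (i : Nat) (acc : Option (Nat × String)) :
    bScan p (l ++ [x]) i acc
      = (if p x.1 (bType x.2)
          then some ((((bScan p l i acc).map Prod.fst).getD (i + l.length)), x.1)
          else bScan p l i acc) := by
  induction l generalizing i acc with
  | nil => simp [bScan]
  | cons y t ih =>
      simp only [List.cons_append, bScan, ih]
      rw [show i + 1 + t.length = i + (y :: t).length from by simp [List.length_cons]; omega]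

lemma bScan_lt (p : String → String → Bool) (l : List (String × List (String × String)))
    (i : Nat) (acc : Option (Nat × String)) (hacc : ∀ a ∈ acc, a.1 < i) :
    ∀ b ∈ bScan p l i acc, b.1 < i + l.length := by
  induction l generalizing i acc with
  | nil =>
      intro b hb
      simp only [List.length_nil, Nat.add_zero]
      exact hacc b (by simpa [bScan] using hb)
  | cons y t ih =>
      intro b hb
      simp only [bScan] at hb
      have h' : ∀ a ∈ (if p y.1 (bType y.2) then some (((acc.map Prod.fst).getD i), y.1) else acc), a.1 < i + 1 := by
        intro a ha
        split at ha
        · simp only [Option.mem_def, Option.some.injEq] at ha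
          subst ha
          cases acc with
          | none => simp
          | some c => have := hacc c rfl; simp; omega
        · exact Nat.lt_succ_of_lt (hacc a ha)
      have := ih (i + 1) _ h' b hb
      simp only [List.length_cons] at *
      omega

lemma canon_foldl (l : List (String × List (String × String))) :
    l.foldl aStep PySem.Dict.empty
      = PySem.Dict.mk (canon (bScan pPath l 0 none) (bScan pParent l 0 none) (bScan pName l 0 none) l.length) := by
  induction l using List.reverseRecOn with
  | nil => rfl
  | append_singleton l x ih =>
      rw [List.foldl_append, List.foldl_cons, List.foldl_nil, ih]
      have b1 := bScan_lt pPath l 0 none (by simp)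
      have b2 := bScan_lt pParent l 0 none (by simp)
      have b3 := bScan_lt pName l 0 none (by simp)
      simp only [Nat.zero_add] at b1 b2 b3
      rw [step_canon x b1 b2 b3]
      rw [bScan_append, bScan_append, bScan_append]
      simp [upd, List.length_append]

-- bridges: bScan's first component is findIdx?, its second is lastMatch
lemma bScan_fst_some (p : String → String → Bool) (l : List (String × List (String × String))) :
    ∀ (i j : Nat) (v : String), (bScan p l i (some (j, v))).map Prod.fst = some j := by
  induction l with
  | nil => intro i j v; rfl
  | cons x t ih =>
      intro i j v
      simp only [bScan]
      by_cases c : p x.1 (bType x.2)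
      · simp only [c, if_true, Option.map_some, Option.getD_some]
        exact ih (i + 1) j x.1
      · simp only [c]
        exact ih (i + 1) j v

lemma bScan_fst_findIdx (p : String → String → Bool) (l : List (String × List (String × String))) :
    ∀ i : Nat, (bScan p l i none).map Prod.fst = (l.findIdx? (fun x => p x.1 (bType x.2))).map (· + i) := by
  induction l with
  | nil => intro i; rfl
  | cons x t ih =>
      intro i
      simp only [bScan, List.findIdx?_cons]
      by_cases c : p x.1 (bType x.2)
      · simp only [c, if_true, Option.map_none, Option.getD_none]
        rw [bScan_fst_some]
        simp
      · simp only [c, Bool.false_eq_true, if_false]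
        rw [ih (i + 1)]
        cases t.findIdx? (fun x => p x.1 (bType x.2))
        · simp
        · simp; omega

lemma bScan_snd_lastMatch (p : String → String → Bool) (l : List (String × List (String × String))) :
    ∀ (i : Nat) (acc : Option (Nat × String)),
      (bScan p l i acc).map Prod.snd = lastMatch p l (acc.map Prod.snd) := by
  induction l with
  | nil => intro i acc; rfl
  | cons x t ih =>
      intro i acc
      simp only [bScan, lastMatch]
      by_cases c : p x.1 (bType x.2)
      · simp only [c, if_true]
        rw [ih]
        simp
      · simp only [c]
        exact ih (i + 1) acc

-- the ordered flatten: when the three first-trigger indices are canonically ordered,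
-- canon is exactly B's three optional entries in category order
lemma canon_none_none_none (n : Nat) : canon none none none n = [] := by
  induction n with
  | zero => rfl
  | succ k ih => rw [canon_succ, ih]; rfl

lemma canon_ordered {s1 s2 s3 : Option (Nat × String)} {n : Nat}
    (h1 : ∀ a ∈ s1, a.1 < n) (h2 : ∀ a ∈ s2, a.1 < n) (h3 : ∀ a ∈ s3, a.1 < n)
    (o12 : ∀ a ∈ s1, ∀ b ∈ s2, a.1 ≤ b.1) (o13 : ∀ a ∈ s1, ∀ b ∈ s3, a.1 ≤ b.1)
    (o23 : ∀ a ∈ s2, ∀ b ∈ s3, a.1 ≤ b.1) :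
    canon s1 s2 s3 n
      = optKV "path" (s1.map Prod.snd) ++ optKV "parent_id" (s2.map Prod.snd) ++ optKV "name" (s3.map Prod.snd) := by
  -- peel the "name" slot
  have peel3 : canon s1 s2 s3 n = canon s1 s2 none n ++ optKV "name" (s3.map Prod.snd) := by
    cases s3 with
    | none => simp [optKV]
    | some a =>
        obtain ⟨i, v⟩ := a
        have hi : i < n := h3 (i, v) rfl
        have hb1 : ∀ a ∈ s1, a.1 < i + 1 := fun a ha => by
          have := o13 a ha (i, v) rfl; omega
        have hb2 : ∀ a ∈ s2, a.1 < i + 1 := fun a ha => by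
          have := o23 a ha (i, v) rfl; omega
        rw [canon_of_le hb1 hb2 (by intro a ha; simp only [Option.mem_def, Option.some.injEq] at ha; subst ha; omega) hi,
            canon_succ, canon_ge3 (s3 := some (i, v)) (by simp),
            canon_of_le (s3 := none) hb1 hb2 (by simp) hi, canon_succ]
        unfold piece
        simp [op, optKV]
  -- peel the "parent_id" slot
  have peel2 : canon s1 s2 none n = canon s1 none none n ++ optKV "parent_id" (s2.map Prod.snd) := by
    cases s2 with
    | none => simp [optKV]
    | some a =>
        obtain ⟨i, v⟩ := a
        have hi : i < n := h2 (i, v) rfl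
        have hb1 : ∀ a ∈ s1, a.1 < i + 1 := fun a ha => by
          have := o12 a ha (i, v) rfl; omega
        rw [canon_of_le hb1 (by intro a ha; simp only [Option.mem_def, Option.some.injEq] at ha; subst ha; omega) (by simp) hi,
            canon_succ, canon_ge2 (s2 := some (i, v)) (by simp),
            canon_of_le (s2 := none) hb1 (by simp) (by simp) hi, canon_succ]
        unfold piece
        simp [op, optKV]
  -- the "path" slot alone
  have peel1 : canon s1 none none n = optKV "path" (s1.map Prod.snd) := by
    cases s1 with
    | none => simp [optKV, canon_none_none_none]
    | some a =>
        obtain ⟨i, v⟩ := a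
        have hi : i < n := h1 (i, v) rfl
        rw [canon_of_le (by intro a ha; simp only [Option.mem_def, Option.some.injEq] at ha; subst ha; omega) (by simp) (by simp) hi,
            canon_succ, canon_ge1 (s1 := some (i, v)) (by simp), canon_none_none_none]
        unfold piece
        simp [op, optKV]
  rw [peel3, peel2, peel1]

-- one ordering hypothesis, transported from Pre_'s ordOpt to the slots
lemma ord_of_ordOpt {p q : String → String → Bool} (l : List (String × List (String × String)))
    (h : ordOpt (fidx p l) (fidx q l) = true) :
    ∀ a ∈ bScan p l 0 none, ∀ b ∈ bScan q l 0 none, a.1 ≤ b.1 := by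
  intro a ha b hb
  have ea : (bScan p l 0 none).map Prod.fst = (l.findIdx? (fun x => p x.1 (bType x.2))).map (· + 0) :=
    bScan_fst_findIdx p l 0
  have eb : (bScan q l 0 none).map Prod.fst = (l.findIdx? (fun x => q x.1 (bType x.2))).map (· + 0) :=
    bScan_fst_findIdx q l 0
  rw [ha] at ea
  rw [hb] at eb
  unfold fidx ordOpt at h
  cases hfa : l.findIdx? (fun x => p x.1 (bType x.2)) with
  | none => rw [hfa] at ea; simp at ea
  | some i =>
      cases hfb : l.findIdx? (fun x => q x.1 (bType x.2)) with
      | none => rw [hfb] at eb; simp at eb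
      | some j =>
          rw [hfa] at ea; rw [hfb] at eb
          simp only [Option.map_some, Option.some.injEq] at ea eb
          rw [hfa, hfb] at h
          simp only [decide_eq_true_eq] at h
          omega

-- ===== VERDICT (by name: the statement is the Claim_ definition above) =====
theorem detect_hierarchical_fields_spec : Claim_equal_detect_hierarchical_fields := by
  intro ec _ hpre
  unfold Pre_detect_hierarchical_fields at hpre
  unfold Spec_detect_hierarchical_fields detect_hierarchical_fields detect_hierarchical_fields_alt
  rw [PySem.Dict.getD_eq_get?_getD] at hpre ⊢
  cases h : (PySem.Dict.mk ec).get? "fields" with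
  | none => simp [lastMatch, optKV]
  | some fl =>
      rw [h] at hpre
      simp only [Option.getD_some] at hpre ⊢
      simp only [Bool.and_eq_true] at hpre
      obtain ⟨⟨h12, h23⟩, h13⟩ := hpre
      have b1 := bScan_lt pPath fl 0 none (by simp)
      have b2 := bScan_lt pParent fl 0 none (by simp)
      have b3 := bScan_lt pName fl 0 none (by simp)
      simp only [Nat.zero_add] at b1 b2 b3
      rw [canon_foldl fl]
      have : (PySem.Dict.mk (canon (bScan pPath fl 0 none) (bScan pParent fl 0 none) (bScan pName fl 0 none) fl.length)).items
          = canon (bScan pPath fl 0 none) (bScan pParent fl 0 none) (bScan pName fl 0 none) fl.length := rfl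
      rw [this,
        canon_ordered b1 b2 b3 (ord_of_ordOpt fl h12) (ord_of_ordOpt fl h13) (ord_of_ordOpt fl h23),
        bScan_snd_lastMatch, bScan_snd_lastMatch, bScan_snd_lastMatch]
      rfl
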